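-- pv_equiv track=rewrite | github.com/aizukanne/OfficeAssistant | old_sources/lambda_function.py | latex_to_slack
-- ===== SOURCE A (Python) =====
-- def latex_to_slack(latex_str):
--     """
--     Convert a LaTeX string to a Slack-friendly format.
--
--     Args:
--     latex_str (str): A string containing LaTeX commands.
--
--     Returns:
--     str: A string formatted for Slack.
--     """
--     # Replace common LaTeX commands with Slack-friendly equivalents
--     replacements = {
--         '\\times': '',  # Multiplication
--         '\\frac': '/',   # Fractions
--         '\\sqrt': '',   # Square root
--         '^': '**',       # Exponentiation
--         '_': '~'         # Subscript
--     }
--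
--     slack_str = latex_str
--     for latex, slack in replacements.items():
--         slack_str = slack_str.replace(latex, slack)
--
--     return slack_str
-- ===== SOURCE B (Python) =====
-- def latex_to_slack(latex_str):
--     """
--     Convert a LaTeX string to a Slack-friendly format.
--
--     Args:
--     latex_str (str): A string containing LaTeX commands.
--
--     Returns:
--     str: A string formatted for Slack.
--     """
--     # Removing the times-command first can splice the surrounding text into a
--     # new frac/sqrt occurrence, so that rule gets its own pass; the remaining
--     # four rules are mutually disjoint and inert, so one scan handles them all.
--     s = latex_str.replace('\\times', '')
--     out = []
--     i = 0
--     n = len(s)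
--     while i < n:
--         c = s[i]
--         if c == '\\' and s.startswith('\\frac', i):
--             out.append('/')
--             i += 5
--         elif c == '\\' and s.startswith('\\sqrt', i):
--             i += 5
--         elif c == '^':
--             out.append('**')
--             i += 1
--         elif c == '_':
--             out.append('~')
--             i += 1
--         else:
--             out.append(c)
--             i += 1
--     return ''.join(out)
-- ===== Notes on version B (the rewrite author's own statement) =====
-- stated objective: alternative
-- what changed: Replaces the loop of five sequential full-string .replace passes by one removal pass for the times command followed by a single left-to-right scan that matches the frac, sqrt, caret and underscore rules at each position and emits the Slack text directly.
import Mathlib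
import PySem

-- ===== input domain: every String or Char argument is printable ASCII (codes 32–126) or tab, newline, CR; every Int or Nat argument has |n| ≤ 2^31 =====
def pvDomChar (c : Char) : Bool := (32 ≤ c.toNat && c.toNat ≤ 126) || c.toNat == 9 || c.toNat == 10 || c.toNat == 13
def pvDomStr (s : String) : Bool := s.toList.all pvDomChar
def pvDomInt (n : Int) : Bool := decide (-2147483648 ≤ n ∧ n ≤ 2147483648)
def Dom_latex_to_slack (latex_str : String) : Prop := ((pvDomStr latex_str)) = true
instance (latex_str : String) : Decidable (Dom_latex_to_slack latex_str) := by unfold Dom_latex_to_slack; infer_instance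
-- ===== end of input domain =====

-- B replaces A's loop of five sequential full-string .replace passes by one removal
-- pass for the times command followed by a single left-to-right scan handling the
-- frac, sqrt, caret and underscore rules at once (objective: alternative structure,
-- same exact output).

-- ===== PORT A =====
def latex_to_slack (latex_str : String) : String :=
  let replacements : PySem.Dict String String :=
    (((((PySem.Dict.empty).insert "\\times" "").insert "\\frac" "/").insert
        "\\sqrt" "").insert "^" "**").insert "_" "~"
  replacements.items.foldl (fun slack_str p => PySem.Str.replace slack_str p.1 p.2) latex_str

-- ===== PORT B =====
-- the single left-to-right scan of Source B's while-loop (out is built as a char list;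
-- ''.join(out) is the final String.ofList)
def pvScanB : List Char → List Char
  | [] => []
  | c :: t =>
    if ['\\', 'f', 'r', 'a', 'c'].isPrefixOf (c :: t) then '/' :: pvScanB (t.drop 4)
    else if ['\\', 's', 'q', 'r', 't'].isPrefixOf (c :: t) then pvScanB (t.drop 4)
    else if c = '^' then '*' :: '*' :: pvScanB t
    else if c = '_' then '~' :: pvScanB t
    else c :: pvScanB t
termination_by l => l.length
decreasing_by all_goals simp

def latex_to_slack_alt (latex_str : String) : String :=
  String.ofList (pvScanB (PySem.Str.replace latex_str "\\times" "").toList)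

-- ===== PRECONDITION & SPEC =====
def Spec_latex_to_slack (latex_str : String) (out : String) : Prop := out = latex_to_slack_alt latex_str
instance (latex_str : String) (out : String) : Decidable (Spec_latex_to_slack latex_str out) := by unfold Spec_latex_to_slack; infer_instance

-- ===== CLAIM (what is proved, stated in full; the proofs are below) =====
def Claim_equal_latex_to_slack : Prop := ∀ (latex_str : String), Dom_latex_to_slack latex_str → Spec_latex_to_slack latex_str (latex_to_slack latex_str)

-- ===== LEMMAS AND PROOFS =====

theorem pvScanB_nil : pvScanB [] = [] := by rw [pvScanB]

theorem pvScanB_cons (c : Char) (t : List Char) :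
    pvScanB (c :: t) =
      if ['\\', 'f', 'r', 'a', 'c'].isPrefixOf (c :: t) then '/' :: pvScanB (t.drop 4)
      else if ['\\', 's', 'q', 'r', 't'].isPrefixOf (c :: t) then pvScanB (t.drop 4)
      else if c = '^' then '*' :: '*' :: pvScanB t
      else if c = '_' then '~' :: pvScanB t
      else c :: pvScanB t := by rw [pvScanB]

-- fuel-free characterization of PySem.Chars.replace (for a nonempty pattern)
def pvRepS (old nw : List Char) : List Char → List Char
  | [] => []
  | c :: t =>
    if old.isPrefixOf (c :: t) then nw ++ pvRepS old nw (t.drop (old.length - 1))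
    else c :: pvRepS old nw t
termination_by l => l.length
decreasing_by all_goals simp

theorem pvRepS_nil (old nw : List Char) : pvRepS old nw [] = [] := by rw [pvRepS]

theorem pvRepS_cons (old nw : List Char) (c : Char) (t : List Char) :
    pvRepS old nw (c :: t) =
      if old.isPrefixOf (c :: t) then nw ++ pvRepS old nw (t.drop (old.length - 1))
      else c :: pvRepS old nw t := by rw [pvRepS]

theorem pvGo_acc (old nw : List Char) :
    ∀ (fuel : Nat) (l acc : List Char),
      PySem.Chars.replace.go old nw fuel l acc = acc.reverse ++ PySem.Chars.replace.go old nw fuel l [] := by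
  intro fuel
  induction fuel with
  | zero => intro l acc; simp [PySem.Chars.replace.go]
  | succ n ih =>
    intro l acc
    cases l with
    | nil => simp [PySem.Chars.replace.go]
    | cons c t =>
      by_cases hp : old.isPrefixOf (c :: t)
      · simp only [PySem.Chars.replace.go, hp, if_pos]
        rw [ih (List.drop old.length (c :: t)) (nw.reverse ++ acc),
            ih (List.drop old.length (c :: t)) (nw.reverse ++ [])]
        simp
      · simp only [PySem.Chars.replace.go, hp, Bool.false_eq_true, if_false]
        rw [ih t (c :: acc), ih t [c]]
        simp

theorem pvGo_eq_repS (old nw : List Char) (hold : old ≠ []) :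
    ∀ (fuel : Nat) (l : List Char), l.length ≤ fuel →
      PySem.Chars.replace.go old nw fuel l [] = pvRepS old nw l := by
  intro fuel
  induction fuel with
  | zero =>
    intro l hl
    have : l = [] := List.eq_nil_of_length_eq_zero (Nat.le_zero.mp hl)
    subst this
    simp [PySem.Chars.replace.go, pvRepS_nil]
  | succ n ih =>
    intro l hl
    cases l with
    | nil => simp [PySem.Chars.replace.go, pvRepS_nil]
    | cons c t =>
      by_cases hp : old.isPrefixOf (c :: t)
      · obtain ⟨o, os, rfl⟩ : ∃ o os, old = o :: os := by
          cases old with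
          | nil => exact absurd rfl hold
          | cons o os => exact ⟨o, os, rfl⟩
        simp only [PySem.Chars.replace.go, hp, if_pos]
        rw [pvGo_acc]
        have hdrop : (c :: t).drop (o :: os).length = t.drop ((o :: os).length - 1) := by simp
        rw [hdrop, ih _ (by simp at hl ⊢; omega)]
        rw [pvRepS_cons]
        simp [hp]
      · simp only [PySem.Chars.replace.go, hp, Bool.false_eq_true, if_false]
        rw [pvGo_acc, ih t (by simp at hl ⊢; omega)]
        rw [pvRepS_cons]
        simp [hp]

theorem pvReplace_eq_repS (l old nw : List Char) (hold : old ≠ []) :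
    PySem.Chars.replace l old nw = pvRepS old nw l := by
  have : old.isEmpty = false := by cases old <;> simp_all
  simp only [PySem.Chars.replace, this, Bool.false_eq_true, if_false]
  exact pvGo_eq_repS old nw hold l.length l le_rfl

-- a pattern containing no '/' that prefixes the output of the \frac pass already prefixed its input
theorem pvPrefix_of_prefix_repS_frac (pat : List Char) (hpat : '/' ∉ pat) :
    ∀ t : List Char, pat.isPrefixOf (pvRepS ['\\', 'f', 'r', 'a', 'c'] ['/'] t) →
      pat.isPrefixOf t := by
  induction pat with
  | nil => intro t _; simp
  | cons p ps ih =>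
    intro t h
    cases t with
    | nil => rw [pvRepS_nil] at h; simp [List.isPrefixOf] at h
    | cons c t' =>
      rw [pvRepS_cons] at h
      by_cases hp : (['\\', 'f', 'r', 'a', 'c'] : List Char).isPrefixOf (c :: t')
      · simp only [hp, if_pos] at h
        simp only [List.cons_append, List.nil_append, List.isPrefixOf, Bool.and_eq_true,
          beq_iff_eq] at h
        exact absurd h.1.symm (by simp at hpat; exact fun hh => (hpat.1 hh).elim)
      · simp only [hp, Bool.false_eq_true, if_false] at h
        simp only [List.isPrefixOf, Bool.and_eq_true, beq_iff_eq] at h ⊢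
        exact ⟨h.1, ih (by simp at hpat; exact hpat.2) t' h.2⟩

-- the four remaining replacement rules as sequential pvRepS passes (A's order)
def pvChain (l : List Char) : List Char :=
  pvRepS ['_'] ['~'] (pvRepS ['^'] ['*', '*']
    (pvRepS ['\\', 's', 'q', 'r', 't'] []
      (pvRepS ['\\', 'f', 'r', 'a', 'c'] ['/'] l)))

theorem pvScanB_eq_chain : ∀ (n : Nat) (l : List Char), l.length ≤ n → pvScanB l = pvChain l := by
  intro n
  induction n with
  | zero =>
    intro l hl
    have : l = [] := List.eq_nil_of_length_eq_zero (Nat.le_zero.mp hl)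
    subst this
    simp [pvScanB_nil, pvChain, pvRepS_nil]
  | succ n ih =>
    intro l hl
    cases l with
    | nil => simp [pvScanB_nil, pvChain, pvRepS_nil]
    | cons c t =>
      rw [pvScanB_cons]
      by_cases hf : (['\\', 'f', 'r', 'a', 'c'] : List Char).isPrefixOf (c :: t)
      · -- \frac at the head: both sides emit '/' and continue after it
        obtain ⟨u, hu⟩ := List.isPrefixOf_iff_prefix.mp hf
        obtain ⟨rfl, rfl⟩ : c = '\\' ∧ t = 'f' :: 'r' :: 'a' :: 'c' :: u := by
          simpa using hu.symm
        simp only [hf, if_pos, List.drop_succ_cons, List.drop_zero]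
        rw [ih u (by simp at hl; omega)]
        unfold pvChain
        simp [pvRepS_cons, List.isPrefixOf]
      · by_cases hs : (['\\', 's', 'q', 'r', 't'] : List Char).isPrefixOf (c :: t)
        · -- \sqrt at the head: both sides drop it and continue after it
          obtain ⟨u, hu⟩ := List.isPrefixOf_iff_prefix.mp hs
          obtain ⟨rfl, rfl⟩ : c = '\\' ∧ t = 's' :: 'q' :: 'r' :: 't' :: u := by
            simpa using hu.symm
          simp only [hf, Bool.false_eq_true, if_false, hs, if_pos, List.drop_succ_cons,
            List.drop_zero]
          rw [ih u (by simp at hl; omega)]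
          unfold pvChain
          simp [pvRepS_cons, List.isPrefixOf]
        · -- no LaTeX command at the head: one character is copied or rewritten by every pass
          have hs' : ¬ (['\\', 's', 'q', 'r', 't'] : List Char).isPrefixOf
              (c :: pvRepS ['\\', 'f', 'r', 'a', 'c'] ['/'] t) := by
            intro hcon
            apply hs
            simp only [List.isPrefixOf, Bool.and_eq_true] at hcon ⊢
            exact ⟨hcon.1, pvPrefix_of_prefix_repS_frac ['s', 'q', 'r', 't'] (by simp) t hcon.2⟩
          have hmain : pvChain (c :: t) =
              (if c = '^' then ['*', '*'] else if c = '_' then ['~'] else [c]) ++ pvChain t := by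
            unfold pvChain
            by_cases hc : c = '^'
            · subst hc
              simp [pvRepS_cons, List.isPrefixOf]
            · by_cases hc2 : c = '_'
              · subst hc2
                simp [pvRepS_cons, List.isPrefixOf]
              · have hc1 : ¬ (('^' : Char) = c) := fun h => hc h.symm
                have hc3 : ¬ (('_' : Char) = c) := fun h => hc2 h.symm
                have hf2 := hf
                simp only [List.isPrefixOf, Bool.and_eq_true, beq_iff_eq,
                  List.isPrefixOf_iff_prefix] at hf2
                have hs2 := hs'
                simp only [List.isPrefixOf, Bool.and_eq_true, beq_iff_eq,
                  List.isPrefixOf_iff_prefix] at hs2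
                simp [pvRepS_cons, List.isPrefixOf, hf2, hs2, hc1, hc3, hc, hc2]
          rw [hmain]
          simp only [hf, Bool.false_eq_true, if_false, hs]
          rw [ih t (by simp at hl; omega)]
          by_cases hc : c = '^' <;> by_cases hc2 : c = '_' <;> simp_all

-- A unfolded: the five sequential replace passes
theorem pvA_eq (s : String) :
    latex_to_slack s =
      PySem.Str.replace (PySem.Str.replace (PySem.Str.replace (PySem.Str.replace
        (PySem.Str.replace s "\\times" "") "\\frac" "/") "\\sqrt" "") "^" "**") "_" "~" := rfl

-- ===== VERDICT (by name: the statement is the Claim_ definition above) =====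
theorem latex_to_slack_spec : Claim_equal_latex_to_slack := by
  intro s _
  unfold Spec_latex_to_slack latex_to_slack_alt
  rw [pvA_eq]
  rw [pvScanB_eq_chain (PySem.Str.replace s "\\times" "").toList.length _ le_rfl]
  simp only [PySem.Str.replace, String.toList_ofList]
  rw [pvReplace_eq_repS _ _ _ (by decide), pvReplace_eq_repS _ _ _ (by decide),
    pvReplace_eq_repS _ _ _ (by decide), pvReplace_eq_repS _ _ _ (by decide)]
  unfold pvChain
  rfl
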